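-- pv_equiv track=rewrite | github.com/25021768-hub/t-duy-t-nh-to-n- | Thạch Minh Hiếu-bài tập/W4A4.py | dem_so_chu_so_khong_string
-- ===== SOURCE A (Python) =====
-- import math
--
-- def dem_so_chu_so_khong_string(n):
--     so_duong = int(math.fabs(n))
--     if so_duong == 0:
--         return 1
--     dem = 0
--     so_hien_tai = so_duong
--     while so_hien_tai > 0:
--         so_hien_tai = so_hien_tai // 10
--         dem = dem + 1
--     return dem
-- ===== SOURCE B (Python) =====
-- import math
--
-- def dem_so_chu_so_khong_string(n):
--     return len(str(int(math.fabs(n))))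
-- ===== Notes on version B (the rewrite author's own statement) =====
-- stated objective: simpler
-- what changed: Replaces the divide-by-10 counting loop (with a special case for zero) by a single expression: the length of the decimal string of the absolute value.
import Mathlib
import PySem

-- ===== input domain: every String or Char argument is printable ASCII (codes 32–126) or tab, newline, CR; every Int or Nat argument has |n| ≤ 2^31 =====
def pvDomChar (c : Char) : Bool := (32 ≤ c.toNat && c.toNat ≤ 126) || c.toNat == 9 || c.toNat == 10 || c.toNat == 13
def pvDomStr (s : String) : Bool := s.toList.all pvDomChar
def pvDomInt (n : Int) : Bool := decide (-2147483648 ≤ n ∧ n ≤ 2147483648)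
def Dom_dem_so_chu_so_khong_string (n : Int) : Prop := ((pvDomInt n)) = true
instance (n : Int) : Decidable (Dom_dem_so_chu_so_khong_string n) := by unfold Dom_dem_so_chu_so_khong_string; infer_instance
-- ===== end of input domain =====

-- B replaces A's divide-by-10 counting loop (and its zero special-case) with len(str(abs)); objective: simpler.


-- ===== PORT A =====
-- the while-loop of A; the loop variable is the nonnegative int `so_hien_tai`, `//` is Python floor division
def pyLoopA (so_hien_tai : Int) (dem : Int) : Int :=
  if h : 0 < so_hien_tai then pyLoopA (PySem.Int.floordiv so_hien_tai 10) (dem + 1) else dem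
termination_by so_hien_tai.toNat
decreasing_by
  rw [PySem.Int.floordiv_eq_ediv_of_pos (by omega)]
  omega

-- int(math.fabs(n)) = |n| exactly for ints in the stated domain (|n| ≤ 2^31 < 2^53)
def dem_so_chu_so_khong_string (n : Int) : Int :=
  let so_duong : Int := |n|
  if so_duong == 0 then 1 else pyLoopA so_duong 0

-- ===== PORT B =====
def dem_so_chu_so_khong_string_alt (n : Int) : Int :=
  PySem.Str.len (PySem.Int.toStr |n|)

-- ===== PRECONDITION & SPEC =====
def Spec_dem_so_chu_so_khong_string (n : Int) (out : Int) : Prop := out = dem_so_chu_so_khong_string_alt n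
instance (n : Int) (out : Int) : Decidable (Spec_dem_so_chu_so_khong_string n out) := by unfold Spec_dem_so_chu_so_khong_string; infer_instance

-- ===== CLAIM (what is proved, stated in full; the proofs are below) =====
def Claim_equal_dem_so_chu_so_khong_string : Prop := ∀ (n : Int), Dom_dem_so_chu_so_khong_string n → Spec_dem_so_chu_so_khong_string n (dem_so_chu_so_khong_string n)

-- ===== LEMMAS AND PROOFS =====

theorem pyLoopA_shift (m dem : Int) : pyLoopA m (dem + 1) = pyLoopA m dem + 1 := by
  by_cases h : 0 < m
  · conv_lhs => rw [pyLoopA]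
    conv_rhs => rw [pyLoopA]
    rw [dif_pos h, dif_pos h]
    have : (PySem.Int.floordiv m 10).toNat < m.toNat := by
      rw [PySem.Int.floordiv_eq_ediv_of_pos (by omega)]; omega
    exact pyLoopA_shift (PySem.Int.floordiv m 10) (dem + 1)
  · conv_lhs => rw [pyLoopA]
    conv_rhs => rw [pyLoopA]
    rw [dif_neg h, dif_neg h]
termination_by m.toNat
decreasing_by exact this

theorem pyLoopA_natCast (m : Nat) (dem : Int) :
    pyLoopA (m : Int) dem = if 0 < m then pyLoopA ((m / 10 : Nat) : Int) (dem + 1) else dem := by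
  have hfd : PySem.Int.floordiv ((m : Int)) 10 = ((m / 10 : Nat) : Int) := by
    exact_mod_cast PySem.Int.floordiv_natCast m 10
  conv_lhs => rw [pyLoopA]
  by_cases h : 0 < m
  · rw [dif_pos (by exact_mod_cast h), if_pos h, hfd]
  · rw [dif_neg (by exact_mod_cast h), if_neg h]

theorem toDigitsCore_len (f : Nat) : ∀ (m : Nat) (l : List Char), 0 < m → m ≤ f →
    ((Nat.toDigitsCore 10 f m l).length : Int) = l.length + pyLoopA (m : Int) 0 := by
  induction f with
  | zero => intro m l hm hf; omega
  | succ f ih =>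
    intro m l hm hf
    rw [Nat.toDigitsCore, pyLoopA_natCast m 0, if_pos hm, pyLoopA_shift]
    by_cases h : m / 10 = 0
    · rw [if_pos h, h]
      rw [pyLoopA, dif_neg (by norm_num)]
      simp
    · rw [if_neg h]
      have hlt : m / 10 < m := Nat.div_lt_self hm (by norm_num)
      rw [ih (m / 10) _ (Nat.pos_of_ne_zero h) (by omega)]
      simp only [List.length_cons]
      push_cast
      ring

theorem dem_so_chu_so_khong_string_eq (n : Int) :
    dem_so_chu_so_khong_string n = dem_so_chu_so_khong_string_alt n := by
  unfold dem_so_chu_so_khong_string dem_so_chu_so_khong_string_alt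
  rw [PySem.Str.len, PySem.Int.toList_toStr]
  have habs : ¬ |n| < 0 := not_lt.mpr (abs_nonneg n)
  have hcast : |n| = ((n.natAbs : Nat) : Int) := Int.abs_eq_natAbs n
  rw [PySem.Int.toChars, if_neg habs]
  dsimp only
  by_cases h0 : n.natAbs = 0
  · have hz : |n| = 0 := by omega
    rw [hz]
    norm_num [Nat.toDigits, Nat.toDigitsCore]
  · have hpos : 0 < n.natAbs := Nat.pos_of_ne_zero h0
    have hne : ¬ (|n| == 0) = true := by simp; omega
    rw [if_neg hne, Nat.toDigits]
    have : |n|.toNat = n.natAbs := by omega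
    rw [this, toDigitsCore_len (n.natAbs + 1) n.natAbs [] hpos (by omega), hcast]
    simp

-- ===== VERDICT (by name: the statement is the Claim_ definition above) =====
theorem dem_so_chu_so_khong_string_spec : Claim_equal_dem_so_chu_so_khong_string := by
  intro n _
  exact dem_so_chu_so_khong_string_eq n
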